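-- pv_equiv track=rewrite | github.com/majkelowskiii/CardGame_War | cardgame.py | pile_shuffle
-- ===== SOURCE A (Python) =====
-- def pile_shuffle(deck):
--
--     shuffled_deck = []
--
--     pile1 = []
--     pile2 = []
--     pile3 = []
--     pile4 = []
--     pile5 = []
--     pile6 = []
--     pile7 = []
--
--     while(deck):
--         if deck:
--             pile1.insert(0, deck.pop(0))
--         if deck:
--             pile2.insert(0, deck.pop(0))
--         if deck:
--             pile3.insert(0, deck.pop(0))
--         if deck:
--             pile4.insert(0, deck.pop(0))
--         if deck:
--             pile5.insert(0, deck.pop(0))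
--         if deck:
--             pile6.insert(0, deck.pop(0))
--         if deck:
--             pile7.insert(0, deck.pop(0))
--
--     shuffled_deck = pile7 + pile6 + pile5 + pile4 + pile3 + pile2 + pile1
--
--     return shuffled_deck
-- ===== SOURCE B (Python) =====
-- def pile_shuffle(deck):
--     # One pass: deal card i onto pile i % 7 by appending (O(1)), then read the
--     # piles back from pile 7 down to pile 1, each reversed.
--     # Note: unlike A, this does not empty `deck` in place.
--     piles = [[], [], [], [], [], [], []]
--     for i, card in enumerate(deck):
--         piles[i % 7].append(card)
--     result = []
--     for pile in reversed(piles):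
--         result += pile[::-1]
--     return result
-- ===== Notes on version B (the rewrite author's own statement) =====
-- stated objective: faster
-- what changed: Replaces the destructive deal (pop(0)/insert(0), each O(n)) with a single pass that appends card i to pile i%7 and one reversed read-out of the piles.
import Mathlib
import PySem

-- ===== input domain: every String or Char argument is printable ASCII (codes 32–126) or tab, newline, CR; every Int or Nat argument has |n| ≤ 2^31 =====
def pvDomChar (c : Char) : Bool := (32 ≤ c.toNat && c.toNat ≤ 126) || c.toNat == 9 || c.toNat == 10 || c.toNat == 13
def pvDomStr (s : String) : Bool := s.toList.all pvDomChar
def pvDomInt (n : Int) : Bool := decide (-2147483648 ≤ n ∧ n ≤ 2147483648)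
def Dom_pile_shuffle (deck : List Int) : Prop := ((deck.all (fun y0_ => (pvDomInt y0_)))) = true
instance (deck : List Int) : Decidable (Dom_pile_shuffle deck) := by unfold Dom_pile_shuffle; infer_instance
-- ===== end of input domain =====

-- B deals card i onto pile i % 7 in one pass (appends, O(1)) instead of A's
-- destructive pop(0)/insert(0) deal; return values agree, but A empties `deck`
-- in place while B leaves it untouched (the equivalence is about the return value).

-- ===== PORT A =====
-- A's while loop: each iteration pops up to 7 cards off the front of `deck`,
-- pushing each onto the front of its pile; ported as recursion on the deck.
def pileLoopA (deck p1 p2 p3 p4 p5 p6 p7 : List Int) : List Int :=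
  match deck with
  | [] => p7 ++ p6 ++ p5 ++ p4 ++ p3 ++ p2 ++ p1
  | [a] => pileLoopA [] (a :: p1) p2 p3 p4 p5 p6 p7
  | [a, b] => pileLoopA [] (a :: p1) (b :: p2) p3 p4 p5 p6 p7
  | [a, b, c] => pileLoopA [] (a :: p1) (b :: p2) (c :: p3) p4 p5 p6 p7
  | [a, b, c, d] => pileLoopA [] (a :: p1) (b :: p2) (c :: p3) (d :: p4) p5 p6 p7
  | [a, b, c, d, e] => pileLoopA [] (a :: p1) (b :: p2) (c :: p3) (d :: p4) (e :: p5) p6 p7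
  | [a, b, c, d, e, f] => pileLoopA [] (a :: p1) (b :: p2) (c :: p3) (d :: p4) (e :: p5) (f :: p6) p7
  | a :: b :: c :: d :: e :: f :: g :: rest =>
      pileLoopA rest (a :: p1) (b :: p2) (c :: p3) (d :: p4) (e :: p5) (f :: p6) (g :: p7)
  termination_by deck.length
  decreasing_by all_goals (simp only [List.length_cons, List.length_nil]; omega)

def pile_shuffle (deck : List Int) : List Int :=
  pileLoopA deck [] [] [] [] [] [] []

-- ===== PORT B =====
-- Source B's `for i, card in enumerate(deck): piles[i % 7].append(card)`
def bloop : List Int → Nat → List (List Int) → List (List Int)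
  | [], _, piles => piles
  | card :: rest, i, piles =>
      bloop rest (i + 1) (piles.set (i % 7) (piles.getD (i % 7) [] ++ [card]))

def pile_shuffle_alt (deck : List Int) : List Int :=
  let piles := bloop deck 0 [[], [], [], [], [], [], []]
  piles.reverse.foldl (fun result pile => result ++ pile.reverse) []

-- ===== PRECONDITION & SPEC =====
def Spec_pile_shuffle (deck : List Int) (out : List Int) : Prop := out = pile_shuffle_alt deck
instance (deck : List Int) (out : List Int) : Decidable (Spec_pile_shuffle deck out) := by unfold Spec_pile_shuffle; infer_instance

-- ===== CLAIM (what is proved, stated in full; the proofs are below) =====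
def Claim_equal_pile_shuffle : Prop := ∀ (deck : List Int), Dom_pile_shuffle deck → Spec_pile_shuffle deck (pile_shuffle deck)

-- ===== LEMMAS AND PROOFS =====

-- every 7th element of a list, starting with the head
def every7 : List Int → List Int
  | [] => []
  | a :: t => a :: every7 (t.drop 6)
  termination_by l => l.length
  decreasing_by simp

-- induction skeleton: 8 cases on the deck, chunks of 7
def chunk7 : List Int → Nat
  | [] => 0
  | [_] => 0
  | [_, _] => 0
  | [_, _, _] => 0
  | [_, _, _, _] => 0
  | [_, _, _, _, _] => 0
  | [_, _, _, _, _, _] => 0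
  | _ :: _ :: _ :: _ :: _ :: _ :: _ :: rest => chunk7 rest + 1
  termination_by l => l.length
  decreasing_by simp only [List.length_cons]; omega

theorem every7_nil : every7 [] = [] := by rw [every7.eq_def]

theorem every7_cons (a : Int) (t : List Int) : every7 (a :: t) = a :: every7 (t.drop 6) := by
  rw [every7.eq_def]

theorem pileLoopA_closed (deck : List Int) :
    ∀ p1 p2 p3 p4 p5 p6 p7 : List Int,
    pileLoopA deck p1 p2 p3 p4 p5 p6 p7 =
      ((every7 (deck.drop 6)).reverse ++ p7) ++ ((every7 (deck.drop 5)).reverse ++ p6) ++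
      ((every7 (deck.drop 4)).reverse ++ p5) ++ ((every7 (deck.drop 3)).reverse ++ p4) ++
      ((every7 (deck.drop 2)).reverse ++ p3) ++ ((every7 (deck.drop 1)).reverse ++ p2) ++
      ((every7 deck).reverse ++ p1) := by
  induction deck using chunk7.induct with
  | case8 a b c d e f g rest ih =>
      intro p1 p2 p3 p4 p5 p6 p7
      rw [pileLoopA, ih]
      simp [every7_cons, List.append_assoc]
  | _ => intro p1 p2 p3 p4 p5 p6 p7; simp [pileLoopA, every7_cons, every7_nil]

theorem bloop_closed (deck : List Int) :
    ∀ (m : Nat) (q0 q1 q2 q3 q4 q5 q6 : List Int),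
    bloop deck (7 * m) [q0, q1, q2, q3, q4, q5, q6] =
      [q0 ++ every7 deck, q1 ++ every7 (deck.drop 1), q2 ++ every7 (deck.drop 2),
       q3 ++ every7 (deck.drop 3), q4 ++ every7 (deck.drop 4),
       q5 ++ every7 (deck.drop 5), q6 ++ every7 (deck.drop 6)] := by
  induction deck using chunk7.induct with
  | case8 a b c d e f g rest ih =>
      intro m q0 q1 q2 q3 q4 q5 q6
      have h0 : 7 * m % 7 = 0 := by omega
      have h1 : (7 * m + 1) % 7 = 1 := by omega
      have h2 : (7 * m + 1 + 1) % 7 = 2 := by omega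
      have h3 : (7 * m + 1 + 1 + 1) % 7 = 3 := by omega
      have h4 : (7 * m + 1 + 1 + 1 + 1) % 7 = 4 := by omega
      have h5 : (7 * m + 1 + 1 + 1 + 1 + 1) % 7 = 5 := by omega
      have h6 : (7 * m + 1 + 1 + 1 + 1 + 1 + 1) % 7 = 6 := by omega
      have h7 : 7 * m + 1 + 1 + 1 + 1 + 1 + 1 + 1 = 7 * (m + 1) := by omega
      simp only [bloop, h0, h1, h2, h3, h4, h5, h6, h7, List.set, List.getD, List.getElem?_cons_zero,
        List.getElem?_cons_succ, Option.getD_some]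
      rw [ih (m + 1)]
      simp [every7_cons, List.append_assoc]
  | _ =>
      intro m q0 q1 q2 q3 q4 q5 q6
      have h0 : 7 * m % 7 = 0 := by omega
      have h1 : (7 * m + 1) % 7 = 1 := by omega
      have h2 : (7 * m + 1 + 1) % 7 = 2 := by omega
      have h3 : (7 * m + 1 + 1 + 1) % 7 = 3 := by omega
      have h4 : (7 * m + 1 + 1 + 1 + 1) % 7 = 4 := by omega
      have h5 : (7 * m + 1 + 1 + 1 + 1 + 1) % 7 = 5 := by omega
      simp [bloop, h0, h1, h2, h3, h4, h5, List.set, List.getD, every7_cons, every7_nil]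

-- ===== VERDICT (by name: the statement is the Claim_ definition above) =====
theorem pile_shuffle_spec : Claim_equal_pile_shuffle := by
  intro deck _
  unfold Spec_pile_shuffle pile_shuffle pile_shuffle_alt
  have hb := bloop_closed deck 0 [] [] [] [] [] [] []
  norm_num at hb
  rw [pileLoopA_closed, hb]
  simp [List.append_assoc]
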